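-- pv_equiv track=rewrite | github.com/oleksandrmelnychenko/ai-bi-server | backend/tools/extract_gba_examples.py | find_statement_end
-- ===== SOURCE A (Python) =====
-- def find_statement_end(content: str, start: int) -> int:
--     """Find the end of a C# statement starting at position start.
--
--     Handles nested parentheses, string literals, and finds the closing semicolon.
--     """
--     pos = start
--     depth = 0  # Track parentheses depth
--     in_string = False
--     string_char = None
--     is_verbatim = False
--
--     while pos < len(content):
--         char = content[pos]
--
--         # Handle string literal detection
--         if not in_string:
--             if char == '"':
--                 in_string = True
--                 string_char = '"'
--                 # Check for verbatim string (@" or $@")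
--                 if pos > 0 and content[pos-1] == '@':
--                     is_verbatim = True
--                 elif pos > 1 and content[pos-2:pos] == '$@':
--                     is_verbatim = True
--                 else:
--                     is_verbatim = False
--             elif char == '(':
--                 depth += 1
--             elif char == ')':
--                 depth -= 1
--             elif char == ';' and depth <= 0:
--                 return pos + 1
--         else:
--             # Inside string literal
--             if is_verbatim:
--                 # Verbatim strings: "" is escape for "
--                 if char == '"':
--                     if pos + 1 < len(content) and content[pos + 1] == '"':
--                         pos += 1  # Skip escaped quote
--                     else:
--                         in_string = False
--             else:
--                 # Regular strings: \" is escape for "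
--                 if char == '\\' and pos + 1 < len(content):
--                     pos += 1  # Skip escape sequence
--                 elif char == '"':
--                     in_string = False
--
--         pos += 1
--
--     return len(content)  # Reached end of content
-- ===== SOURCE B (Python) =====
-- def code_positions(content: str, start: int) -> list:
--     """Pass 1: the positions >= start whose characters lie OUTSIDE string literal
--     bodies (opening quotes included), in order, up to the end of content."""
--     n = len(content)
--     out = []
--     i = start
--     while i < n:
--         c = content[i]
--         out.append(i)
--         if c == '"':
--             # determine verbatim (@" or $@") by the same backward checks
--             if i > 0 and content[i - 1] == '@':
--                 verbatim = True
--             elif i > 1 and content[i - 2:i] == '$@':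
--                 verbatim = True
--             else:
--                 verbatim = False
--             i += 1
--             # consume the string body
--             while i < n:
--                 c = content[i]
--                 if verbatim:
--                     if c == '"':
--                         if i + 1 < n and content[i + 1] == '"':
--                             i += 2
--                         else:
--                             i += 1
--                             break
--                     else:
--                         i += 1
--                 else:
--                     if c == '\\' and i + 1 < n:
--                         i += 2
--                     elif c == '"':
--                         i += 1
--                         break
--                     else:
--                         i += 1
--         else:
--             i += 1
--     return out
--
--
-- def find_statement_end(content: str, start: int) -> int:
--     """Pass 2: fold over the non-string positions tracking parenthesis depth."""
--     depth = 0
--     for i in code_positions(content, start):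
--         c = content[i]
--         if c == '(':
--             depth += 1
--         elif c == ')':
--             depth -= 1
--         elif c == ';' and depth <= 0:
--             return i + 1
--     return len(content)
-- ===== Notes on version B (the rewrite author's own statement) =====
-- stated objective: alternative
-- what changed: B works in two staged passes with an intermediate data structure: pass 1 builds the list of positions lying outside string-literal bodies, pass 2 folds over that list tracking only parenthesis depth to find the semicolon, whereas A interleaves everything in one flag-driven loop over the raw text.
import Mathlib
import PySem

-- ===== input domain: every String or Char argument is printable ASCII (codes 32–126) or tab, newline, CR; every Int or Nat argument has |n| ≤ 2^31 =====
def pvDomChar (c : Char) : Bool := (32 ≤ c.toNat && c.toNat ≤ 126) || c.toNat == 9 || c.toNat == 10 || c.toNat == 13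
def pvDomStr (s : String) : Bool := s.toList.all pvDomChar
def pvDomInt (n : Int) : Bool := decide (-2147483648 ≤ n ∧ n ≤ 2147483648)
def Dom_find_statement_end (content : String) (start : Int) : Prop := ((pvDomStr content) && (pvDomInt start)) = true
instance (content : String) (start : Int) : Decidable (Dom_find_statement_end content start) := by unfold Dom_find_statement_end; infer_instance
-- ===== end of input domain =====

-- B replaces A's one flag-driven loop by two staged passes: pass 1 builds the list of positions
-- outside string-literal bodies, pass 2 folds over that list tracking parenthesis depth; objective:
-- alternative (same cost, different structure).

-- verbatim-string detection at an opening quote (@" or $@"): the identical backward checks both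
-- Python versions write inline
def verbatimAt (cs : List Char) (pos : Int) : Bool :=
  if 0 < pos ∧ PySem.List.pyGet? cs (pos - 1) = some '@' then true
  else if 1 < pos ∧ PySem.List.slice cs (some (pos - 2)) (some pos) = ['$', '@'] then true
  else false

-- ===== PORT A =====
-- A's while loop over pos with state (depth, in_string, is_verbatim); string_char is written but
-- never read in A, so it is omitted.  The loop advances pos by ≥ 1 per iteration, so fuel
-- (len - start).toNat + 1 makes the structural recursion exact.  pyGet? = none (Python IndexError,
-- pos < -len) returns 0: unreachable under Pre_.
def fseA (cs : List Char) : Nat → Int → Int → Bool → Bool → Int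
  | 0, _, _, _, _ => 0
  | fuel + 1, pos, depth, in_string, is_verbatim =>
    if pos < (cs.length : Int) then
      match PySem.List.pyGet? cs pos with
      | none => 0
      | some c =>
        if in_string = false then
          if c = '"' then fseA cs fuel (pos + 1) depth true (verbatimAt cs pos)
          else if c = '(' then fseA cs fuel (pos + 1) (depth + 1) false is_verbatim
          else if c = ')' then fseA cs fuel (pos + 1) (depth - 1) false is_verbatim
          else if c = ';' ∧ depth ≤ 0 then pos + 1
          else fseA cs fuel (pos + 1) depth false is_verbatim
        else
          if is_verbatim then
            if c = '"' then
              if pos + 1 < (cs.length : Int) ∧ PySem.List.pyGet? cs (pos + 1) = some '"' then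
                fseA cs fuel (pos + 2) depth true true
              else fseA cs fuel (pos + 1) depth false true
            else fseA cs fuel (pos + 1) depth true true
          else
            if c = '\\' ∧ pos + 1 < (cs.length : Int) then fseA cs fuel (pos + 2) depth true false
            else if c = '"' then fseA cs fuel (pos + 1) depth false false
            else fseA cs fuel (pos + 1) depth true false
    else (cs.length : Int)

def find_statement_end (content : String) (start : Int) : Int :=
  fseA content.toList (((content.toList.length : Int) - start).toNat + 1) start 0 false false

-- ===== PORT B =====
-- Source B's inner while loop consuming a string body: returns the index at which the outer loop
-- resumes (index just past the closing quote, or len if unterminated); fuel as in fseA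
def consumeStr (cs : List Char) : Nat → Int → Bool → Int
  | 0, _, _ => 0
  | fuel + 1, i, verbatim =>
    if i < (cs.length : Int) then
      match PySem.List.pyGet? cs i with
      | none => 0
      | some c =>
        if verbatim then
          if c = '"' then
            if i + 1 < (cs.length : Int) ∧ PySem.List.pyGet? cs (i + 1) = some '"' then
              consumeStr cs fuel (i + 2) verbatim
            else i + 1
          else consumeStr cs fuel (i + 1) verbatim
        else
          if c = '\\' ∧ i + 1 < (cs.length : Int) then consumeStr cs fuel (i + 2) verbatim
          else if c = '"' then i + 1
          else consumeStr cs fuel (i + 1) verbatim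
    else (cs.length : Int)

-- pass 1 (code_positions): the list of positions outside string-literal bodies
def codePos (cs : List Char) : Nat → Int → List Int
  | 0, _ => []
  | fuel + 1, i =>
    if i < (cs.length : Int) then
      match PySem.List.pyGet? cs i with
      | none => []
      | some c =>
        i :: (if c = '"' then codePos cs fuel (consumeStr cs fuel (i + 1) (verbatimAt cs i))
              else codePos cs fuel (i + 1))
    else []

-- pass 2: Source B's for-loop over the position list, tracking only depth
def foldDepth (cs : List Char) : List Int → Int → Int
  | [], _ => (cs.length : Int)
  | i :: rest, depth =>
    match PySem.List.pyGet? cs i with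
    | none => 0
    | some c =>
      if c = '(' then foldDepth cs rest (depth + 1)
      else if c = ')' then foldDepth cs rest (depth - 1)
      else if c = ';' ∧ depth ≤ 0 then i + 1
      else foldDepth cs rest depth

def find_statement_end_alt (content : String) (start : Int) : Int :=
  foldDepth content.toList
    (codePos content.toList (((content.toList.length : Int) - start).toNat + 1) start) 0

-- ===== PRECONDITION & SPEC =====
-- Pre_ excludes exactly the inputs where Python A raises IndexError: start < -len(content)
-- (the first content[pos] access is then out of range even after negative-index wraparound).
def Pre_find_statement_end (content : String) (start : Int) : Prop :=
  -(content.toList.length : Int) ≤ start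
instance (content : String) (start : Int) : Decidable (Pre_find_statement_end content start) := by
  unfold Pre_find_statement_end; infer_instance

def pvWitness_find_statement_end : String × Int := ("foo(a, \"x;\");", 0)

def Spec_find_statement_end (content : String) (start : Int) (out : Int) : Prop := out = find_statement_end_alt content start
instance (content : String) (start : Int) (out : Int) : Decidable (Spec_find_statement_end content start out) := by unfold Spec_find_statement_end; infer_instance

-- ===== CLAIM (what is proved, stated in full; the proofs are below) =====
def Claim_equal_find_statement_end : Prop := ∀ (content : String) (start : Int), Dom_find_statement_end content start → Pre_find_statement_end content start → Spec_find_statement_end content start (find_statement_end content start)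

-- ===== LEMMAS AND PROOFS =====

theorem pyGet?_some_of_range (cs : List Char) (i : Int)
    (h1 : -(cs.length : Int) ≤ i) (h2 : i < (cs.length : Int)) :
    ∃ c, PySem.List.pyGet? cs i = some c := by
  cases hc : PySem.List.pyGet? cs i with
  | none =>
    rw [PySem.List.pyGet?_eq_none_iff] at hc
    exact absurd ⟨h1, h2⟩ hc
  | some c => exact ⟨c, rfl⟩

-- lower bound on consumeStr's result (under sufficient fuel)
theorem consumeStr_lb (cs : List Char) : ∀ (f : Nat) (i : Int) (vb : Bool),
    ((cs.length : Int) - i).toNat < f → min i (cs.length : Int) ≤ consumeStr cs f i vb := by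
  intro f
  induction f with
  | zero => intro i vb hf; omega
  | succ f ih =>
    intro i vb hf
    rw [consumeStr]
    by_cases hp : i < (cs.length : Int)
    · simp only [if_pos hp]
      cases hc : PySem.List.pyGet? cs i with
      | none =>
        have hir := hc
        rw [PySem.List.pyGet?_eq_none_iff] at hir
        simp only [PySem.Raise.InRange, not_and, not_lt] at hir
        simp only [hc]
        omega
      | some c =>
        simp only [hc]
        have h1 := ih (i + 1) vb (by omega)
        have h2 := ih (i + 2) vb (by omega)
        split_ifs <;> omega
    · simp only [if_neg hp]; omega

-- fseA's result does not depend on the fuel, as long as the fuel is sufficient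
theorem fseA_fuel_irrel (cs : List Char) : ∀ (f g : Nat) (p d : Int) (instr iv : Bool),
    -(cs.length : Int) ≤ p →
    ((cs.length : Int) - p).toNat < f → ((cs.length : Int) - p).toNat < g →
    fseA cs f p d instr iv = fseA cs g p d instr iv := by
  intro f
  induction f with
  | zero => intro g p d instr iv _ hf _; omega
  | succ f ih =>
    intro g p d instr iv hlb hf hg
    cases g with
    | zero => omega
    | succ g =>
      rw [fseA, fseA]
      by_cases hp : p < (cs.length : Int)
      · simp only [if_pos hp]
        obtain ⟨c, hc⟩ := pyGet?_some_of_range cs p hlb hp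
        simp only [hc]
        split_ifs <;>
          first
            | rfl
            | exact ih g (p + 1) _ _ _ (by omega) (by omega) (by omega)
            | exact ih g (p + 2) _ _ _ (by omega) (by omega) (by omega)
      · simp only [if_neg hp]

-- the string phase of A's loop equals consuming the literal, then resuming out of the string
theorem fseA_string (cs : List Char) : ∀ (f : Nat) (p d : Int) (iv : Bool),
    -(cs.length : Int) ≤ p → ((cs.length : Int) - p).toNat < f →
    fseA cs f p d true iv = fseA cs f (consumeStr cs f p iv) d false iv := by
  intro f
  induction f with
  | zero => intro p d iv _ hf; omega
  | succ f ih =>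
    intro p d iv hlb hf
    by_cases hp : p < (cs.length : Int)
    · obtain ⟨c, hc⟩ := pyGet?_some_of_range cs p hlb hp
      have hf1 : ((cs.length : Int) - p).toNat ≤ f := by omega
      rw [fseA]
      conv_rhs => rw [consumeStr]
      simp only [if_pos hp, hc]
      cases iv with
      | true =>
        by_cases hq : c = '"'
        · by_cases hnext : p + 1 < (cs.length : Int) ∧ PySem.List.pyGet? cs (p + 1) = some '"'
          · simp only [hq, hnext, and_self, if_true, Bool.true_eq_false, if_false, if_pos]
            rw [ih (p + 2) d true (by omega) (by omega)]
            have hs := consumeStr_lb cs f (p + 2) true (by omega)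
            exact fseA_fuel_irrel cs f (f + 1) _ d false true (by omega) (by omega) (by omega)
          · simp [hq, hnext]
            rw [fseA]; simp [hp, hc, hq]
            exact fseA_fuel_irrel cs f (f + 1) (p + 1) d false true (by omega) (by omega) (by omega)
        · simp only [hq, Bool.true_eq_false, if_false]
          simp
          rw [ih (p + 1) d true (by omega) (by omega)]
          have hs := consumeStr_lb cs f (p + 1) true (by omega)
          exact fseA_fuel_irrel cs f (f + 1) _ d false true (by omega) (by omega) (by omega)
      | false =>
        by_cases hbs : c = '\\' ∧ p + 1 < (cs.length : Int)
        · simp [hbs]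
          rw [ih (p + 2) d false (by omega) (by omega)]
          have hs := consumeStr_lb cs f (p + 2) false (by omega)
          exact fseA_fuel_irrel cs f (f + 1) _ d false false (by omega) (by omega) (by omega)
        · by_cases hq : c = '"'
          · simp [hq]
            rw [fseA]; simp [hp, hc, hq]
            exact fseA_fuel_irrel cs f (f + 1) (p + 1) d false false (by omega) (by omega) (by omega)
          · simp [hq, hbs]
            rw [ih (p + 1) d false (by omega) (by omega)]
            have hs := consumeStr_lb cs f (p + 1) false (by omega)
            exact fseA_fuel_irrel cs f (f + 1) _ d false false (by omega) (by omega) (by omega)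
    · rw [fseA]
      conv_rhs => rw [consumeStr]
      simp only [if_neg hp]
      rw [fseA]
      simp only [if_neg (by omega : ¬ (cs.length : Int) < (cs.length : Int))]

-- A's out-of-string loop equals B's fold over the code-position list
theorem fseA_eq_fold (cs : List Char) : ∀ (f : Nat) (p d : Int) (iv : Bool),
    -(cs.length : Int) ≤ p → ((cs.length : Int) - p).toNat < f →
    fseA cs f p d false iv = foldDepth cs (codePos cs f p) d := by
  intro f
  induction f with
  | zero => intro p d iv _ hf; omega
  | succ f ih =>
    intro p d iv hlb hf
    rw [fseA, codePos]
    by_cases hp : p < (cs.length : Int)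
    · simp only [if_pos hp]
      obtain ⟨c, hc⟩ := pyGet?_some_of_range cs p hlb hp
      simp only [hc]
      by_cases hq : c = '"'
      · simp only [hq, if_pos rfl, if_true, foldDepth, hc]
        rw [fseA_string cs f (p + 1) d (verbatimAt cs p) (by omega) (by omega)]
        have hs := consumeStr_lb cs f (p + 1) (verbatimAt cs p) (by omega)
        rw [ih (consumeStr cs f (p + 1) (verbatimAt cs p)) d (verbatimAt cs p) (by omega) (by omega)]
        -- '"' is none of '(' ')' ';', so the fold just recurses
        simp [foldDepth, hc]
      · simp only [hq, if_false, foldDepth, hc]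
        by_cases ho : c = '('
        · simp only [ho, if_pos rfl, if_true]
          exact ih (p + 1) (d + 1) iv (by omega) (by omega)
        · simp only [ho, if_false]
          by_cases hcl : c = ')'
          · simp only [hcl, if_pos rfl, if_true]
            exact ih (p + 1) (d - 1) iv (by omega) (by omega)
          · simp only [hcl, if_false]
            by_cases hsemi : c = ';' ∧ d ≤ 0
            · simp [hsemi]
            · simp only [if_neg hsemi]
              exact ih (p + 1) d iv (by omega) (by omega)
    · simp only [if_neg hp, foldDepth]

-- ===== VERDICT (by name: the statement is the Claim_ definition above) =====
theorem find_statement_end_spec : Claim_equal_find_statement_end := by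
  intro content start _ hpre
  unfold Spec_find_statement_end find_statement_end find_statement_end_alt
  exact fseA_eq_fold content.toList (((content.toList.length : Int) - start).toNat + 1) start 0
    false hpre (by omega)
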